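-- pv_equiv track=rewrite | github.com/gsravank/ds-algo | codeforces/cf_550/a.py | check_diverse
-- ===== SOURCE A (Python) =====
-- def check_diverse(s):
--     if len(s) == 1:
--         return True
--
--     if len(s) == len(set(s)):
--         ords = [ord(ch) for ch in s]
--
--         min_ords = min(ords)
--         max_ords = max(ords)
--
--         if max_ords - min_ords + 1 == len(s):
--             return True
--         else:
--             return False
--     else:
--         return False
-- ===== SOURCE B (Python) =====
-- def check_diverse(s):
--     ords = sorted(map(ord, s))
--     return ords == list(range(ords[0], ords[-1] + 1))
-- ===== Notes on version B (the rewrite author's own statement) =====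
-- stated objective: simpler
-- what changed: Replaces the set-based distinctness test plus min/max arithmetic (and the len==1 special case) by sorting the character codes once and comparing the sorted list to the integer range between its first and last element, which captures distinctness and contiguity in a single comparison.
import Mathlib
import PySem

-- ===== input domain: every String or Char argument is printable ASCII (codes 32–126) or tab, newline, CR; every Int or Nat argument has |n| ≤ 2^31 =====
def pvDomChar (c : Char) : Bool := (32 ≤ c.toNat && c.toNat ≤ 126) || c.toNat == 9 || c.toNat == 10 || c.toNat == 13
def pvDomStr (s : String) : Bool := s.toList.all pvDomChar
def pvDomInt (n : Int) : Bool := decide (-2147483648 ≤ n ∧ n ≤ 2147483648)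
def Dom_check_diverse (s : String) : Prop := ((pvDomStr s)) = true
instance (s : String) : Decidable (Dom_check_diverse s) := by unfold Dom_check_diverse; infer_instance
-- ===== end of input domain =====

-- B sorts the character codes once and compares them with the contiguous integer range
-- between its first and last element (objective: simpler — one comparison replaces the
-- set test, the min/max arithmetic and the len==1 guard).

-- ===== PORT A =====
def check_diverse (s : String) : Bool :=
  let cs := s.toList
  if cs.length == 1 then true
  else if cs.length == (PySem.Set.ofList cs).length then
    let ords := cs.map (fun ch => (ch.toNat : Int))
    match PySem.List.min? ords (fun x => x), PySem.List.max? ords (fun x => x) with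
    | some min_ords, some max_ords =>
        if max_ords - min_ords + 1 == (cs.length : Int) then true else false
    | _, _ => false   -- unreachable under Pre_ (min/max of an empty list raise in Python)
  else false

-- ===== PORT B =====
def check_diverse_alt (s : String) : Bool :=
  let ords := PySem.List.sorted (s.toList.map (fun ch => (ch.toNat : Int))) (fun x => x) false
  match PySem.List.pyGet? ords 0 with
  | none => false   -- unreachable under Pre_ (ords[0] of an empty list raises in Python)
  | some lo =>
    match PySem.List.pyGet? ords (-1) with
    | none => false
    | some hi => ords == PySem.List.pyRange lo (hi + 1) 1

-- ===== PRECONDITION & SPEC =====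
-- Pre_ excludes only the empty string, on which A raises ValueError (min of an empty list).
def Pre_check_diverse (s : String) : Prop := s ≠ ""
instance (s : String) : Decidable (Pre_check_diverse s) := by unfold Pre_check_diverse; infer_instance
def pvWitness_check_diverse : String := "abc"

def Spec_check_diverse (s : String) (out : Bool) : Prop := out = check_diverse_alt s
instance (s : String) (out : Bool) : Decidable (Spec_check_diverse s out) := by unfold Spec_check_diverse; infer_instance

-- ===== CLAIM (what is proved, stated in full; the proofs are below) =====
def Claim_equal_check_diverse : Prop := ∀ (s : String), Dom_check_diverse s → Pre_check_diverse s → Spec_check_diverse s (check_diverse s)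

-- ===== LEMMAS AND PROOFS =====

-- set(cs) has the same length as cs exactly when cs has no duplicates
theorem pv_setlen_iff_nodup (cs : List Char) :
    ((PySem.Set.ofList cs).length = cs.length) ↔ cs.Nodup := by
  have hfin : (PySem.Set.ofList cs).toFinset = cs.toFinset := by
    ext x; simp [List.mem_toFinset, PySem.Set.mem_ofList]
  have h1 : (PySem.Set.ofList cs).length = cs.dedup.length := by
    rw [← List.toFinset_card_of_nodup (PySem.Set.nodup_ofList cs), hfin, List.card_toFinset]
  rw [h1]
  constructor
  · intro h
    exact List.dedup_eq_self.mp (List.Sublist.eq_of_length (List.dedup_sublist cs) h)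
  · intro h; rw [List.dedup_eq_self.mpr h]

-- mapping ord over chars preserves Nodup in both directions
theorem pv_nodup_map_ord (cs : List Char) :
    (cs.map (fun ch => (ch.toNat : Int))).Nodup ↔ cs.Nodup := by
  have hinj : Function.Injective (fun ch : Char => (ch.toNat : Int)) := by
    intro a b h
    simp only [Int.natCast_inj] at h
    exact Char.ext (by unfold Char.toNat at h; exact UInt32.toNat_inj.mp h)
  exact ⟨fun h => h.of_map _, fun h => h.map hinj⟩

-- pyGet? at index -1 of a nonempty list is its last element
theorem pv_pyGet_neg_one {α : Type} (xs : List α) (h : xs ≠ []) :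
    PySem.List.pyGet? xs (-1) = some (xs.getLast h) := by
  have hlen : 1 ≤ xs.length := List.length_pos_iff.mpr h
  simp [PySem.List.pyGet?, PySem.List.pyIdx?, hlen, List.getLast_eq_getElem,
    List.getElem?_eq_getElem (by omega : xs.length - 1 < xs.length)]

-- the last element of sorted(l) bounds every element of l from above
theorem pv_sorted_getLast_max (l : List Int) (h : PySem.List.sorted l (fun x => x) false ≠ []) :
    ∀ y ∈ l, y ≤ (PySem.List.sorted l (fun x => x) false).getLast h := by
  intro y hy
  have hy' : y ∈ PySem.List.sorted l (fun x => x) false :=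
    ((PySem.List.sorted_perm l (fun x => x) false).mem_iff).mpr hy
  obtain ⟨i, hi, rfl⟩ := List.getElem_of_mem hy'
  rw [List.getLast_eq_getElem]
  exact PySem.List.sorted_id_getElem_mono l (by omega) (by omega)

-- CORE: sorted(l) equals the range of its own endpoints iff l is duplicate-free of the right length
theorem pv_core (l : List Int) (lo hi : Int) (h : PySem.List.sorted l (fun x => x) false ≠ [])
    (hlo : (PySem.List.sorted l (fun x => x) false).head h = lo)
    (hhi : (PySem.List.sorted l (fun x => x) false).getLast h = hi) :
    (PySem.List.sorted l (fun x => x) false = PySem.List.pyRange lo (hi + 1) 1) ↔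
      (l.Nodup ∧ hi - lo + 1 = (l.length : Int)) := by
  have hperm : (PySem.List.sorted l (fun x => x) false).Perm l :=
    PySem.List.sorted_perm l (fun x => x) false
  constructor
  · intro hr
    have hnd : l.Nodup := hperm.nodup (hr ▸ PySem.List.nodup_pyRange_one lo (hi + 1))
    have hhim : hi ∈ PySem.List.pyRange lo (hi + 1) := by
      rw [← hr, ← hhi]; exact List.getLast_mem h
    have hlohi : lo ≤ hi := (PySem.List.mem_pyRange_one.mp hhim).1
    have hlen : l.length = (PySem.List.pyRange lo (hi + 1)).length := by
      rw [← hr]; exact hperm.length_eq.symm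
    rw [PySem.List.length_pyRange_one] at hlen
    exact ⟨hnd, by omega⟩
  · rintro ⟨hnd, hlen⟩
    have hlo_le : ∀ y ∈ l, lo ≤ y := by
      obtain ⟨m, t, hm⟩ := List.exists_cons_of_ne_nil h
      have := PySem.List.key_head_sorted_le l (fun x => x) hm
      have hm' : m = lo := by simp [hm] at hlo; exact hlo
      simpa [hm'] using this
    have hhi_ge : ∀ y ∈ l, y ≤ hi := by
      intro y hy; have := pv_sorted_getLast_max l h y hy; omega
    have hsub : l.toFinset ⊆ Finset.Icc lo hi := by
      intro x hx
      rw [List.mem_toFinset] at hx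
      exact Finset.mem_Icc.mpr ⟨hlo_le x hx, hhi_ge x hx⟩
    have hcard : (Finset.Icc lo hi).card ≤ l.toFinset.card := by
      rw [Int.card_Icc, List.toFinset_card_of_nodup hnd]; omega
    have heq : l.toFinset = Finset.Icc lo hi := Finset.eq_of_subset_of_card_le hsub hcard
    have hmem : ∀ x : Int, x ∈ PySem.List.pyRange lo (hi + 1) ↔ x ∈ l := by
      intro x
      rw [PySem.List.mem_pyRange_one, ← List.mem_toFinset, heq, Finset.mem_Icc]
      omega
    have hperm2 : (PySem.List.pyRange lo (hi + 1)).Perm l :=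
      (List.perm_ext_iff_of_nodup (PySem.List.nodup_pyRange_one lo (hi + 1)) hnd).mpr hmem
    exact PySem.List.sorted_eq_of_perm_of_pairwise_lt l (PySem.List.pyRange lo (hi + 1))
      (fun x => x) hperm2 (by simpa using PySem.List.pairwise_lt_pyRange_one lo (hi + 1))

-- ===== VERDICT (by name: the statement is the Claim_ definition above) =====
theorem check_diverse_spec : Claim_equal_check_diverse := by
  intro s _ hpre
  unfold Spec_check_diverse check_diverse check_diverse_alt
  have hcs : s.toList ≠ [] := by rw [Ne, String.toList_eq_nil_iff]; exact hpre
  simp only []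
  generalize hg : s.toList = cs at hcs ⊢
  generalize hlmap : List.map (fun ch => ((ch.toNat : Int))) cs = l
  have hl : l ≠ [] := by rw [← hlmap]; simp [hcs]
  have hs : PySem.List.sorted l (fun x => x) false ≠ [] := by
    rw [Ne, PySem.List.sorted_eq_nil_iff]; exact hl
  have hperm : (PySem.List.sorted l (fun x => x) false).Perm l :=
    PySem.List.sorted_perm l (fun x => x) false
  -- endpoints of the sorted list
  obtain ⟨lo, hlo⟩ : ∃ lo, (PySem.List.sorted l (fun x => x) false).head hs = lo := ⟨_, rfl⟩
  obtain ⟨hi, hhi⟩ : ∃ hi, (PySem.List.sorted l (fun x => x) false).getLast hs = hi := ⟨_, rfl⟩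
  -- B's two lookups
  have h0 : PySem.List.pyGet? (PySem.List.sorted l (fun x => x) false) 0 = some lo := by
    have hz : ((0 : Nat) : Int) = 0 := rfl
    rw [← hz, PySem.List.pyGet?_natCast, ← List.head?_eq_getElem?, List.head?_eq_some_head hs, hlo]
  have hneg : PySem.List.pyGet? (PySem.List.sorted l (fun x => x) false) (-1) = some hi := by
    rw [pv_pyGet_neg_one _ hs, hhi]
  -- endpoint facts
  have hlomem : lo ∈ l := hperm.mem_iff.mp (hlo ▸ List.head_mem hs)
  have hhimem : hi ∈ l := hperm.mem_iff.mp (hhi ▸ List.getLast_mem hs)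
  have hlo_le : ∀ y ∈ l, lo ≤ y := by
    obtain ⟨m, t, hm⟩ := List.exists_cons_of_ne_nil hs
    have := PySem.List.key_head_sorted_le l (fun x => x) hm
    have hm' : m = lo := by simp only [hm, List.head_cons] at hlo; exact hlo
    simpa [hm'] using this
  have hhi_ge : ∀ y ∈ l, y ≤ hi := fun y hy => hhi ▸ pv_sorted_getLast_max l hs y hy
  -- A's min and max are those endpoints
  have hmin : PySem.List.min? l (fun x => x) = some lo := by
    cases hmn : PySem.List.min? l (fun x => x) with
    | none => exact absurd ((PySem.List.min?_eq_none_iff _ _).mp hmn) hl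
    | some m =>
      have h1 : m ≤ lo := PySem.List.min?_isMin hmn lo hlomem
      have h2 : lo ≤ m := hlo_le m (PySem.List.min?_mem hmn)
      rw [le_antisymm h1 h2]
  have hmax : PySem.List.max? l (fun x => x) = some hi := by
    cases hmx : PySem.List.max? l (fun x => x) with
    | none => exact absurd ((PySem.List.max?_eq_none_iff _ _).mp hmx) hl
    | some m =>
      have h1 : hi ≤ m := PySem.List.max?_isMax hmx hi hhimem
      have h2 : m ≤ hi := hhi_ge m (PySem.List.max?_mem hmx)
      rw [le_antisymm h2 h1]
  have hcore := pv_core l lo hi hs hlo hhi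
  have hlen : l.length = cs.length := by rw [← hlmap]; simp
  simp only [hmin, hmax, h0, hneg]
  rw [Bool.eq_iff_iff]
  simp only [beq_iff_eq]
  constructor
  · intro hA
    rw [hcore, hlen]
    split_ifs at hA with h1 h2 h3
    · -- length-1 string: the one-element sorted list is its own one-element range
      have hl1 : l.length = 1 := by rw [hlen, h1]
      obtain ⟨a, ha⟩ := List.length_eq_one_iff.mp
        (by rw [hperm.length_eq, hl1] : (PySem.List.sorted l (fun x => x) false).length = 1)
      have hloa : lo = a := by simp only [ha, List.head_cons] at hlo; exact hlo.symm
      have hhia : hi = a := by simp only [ha, List.getLast_singleton] at hhi; exact hhi.symm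
      refine ⟨?_, by rw [hloa, hhia, h1]; ring⟩
      rw [← hlmap]
      refine (pv_nodup_map_ord cs).mpr ?_
      obtain ⟨c, hc⟩ := List.length_eq_one_iff.mp h1
      simp [hc]
    · exact ⟨by rw [← hlmap]; exact (pv_nodup_map_ord cs).mpr ((pv_setlen_iff_nodup cs).mp h2.symm), h3⟩
  · intro hB
    obtain ⟨hnd, hspan⟩ := hcore.mp hB
    have hndc : cs.Nodup := (pv_nodup_map_ord cs).mp (hlmap ▸ hnd)
    rw [hlen] at hspan
    split_ifs with h1 h2
    · rfl
    · rfl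
    · exact h2 ((pv_setlen_iff_nodup cs).mpr hndc).symm
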